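-- pv_equiv track=rewrite | github.com/GrafSpiel/GROMARK | gromark_variations.py | fibonacci_expansion
-- ===== SOURCE A (Python) =====
-- def fibonacci_expansion(primer, base, length):
--     """
--     Expand a primer using Fibonacci-style addition (a variant of Gromark).
--
--     Args:
--         primer (list): Initial primer digits
--         base (int): The number base to use
--         length (int): Desired length of the key sequence
--
--     Returns:
--         list: Expanded key sequence
--     """
--     key = list(primer)
--     while len(key) < length:
--         next_digit = 0
--         # Sum the last n digits (where n is the primer length)
--         for i in range(1, len(primer) + 1):
--             if i <= len(key):
--                 next_digit = (next_digit + key[-i]) % base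
--         key.append(next_digit)
--     return key[:length]
-- ===== SOURCE B (Python) =====
-- def fibonacci_expansion(primer, base, length):
--     # Incrementally maintained sliding-window sum of the last len(primer) digits.
--     if not primer:
--         return [0] * max(length, 0)
--     n = len(primer)
--     key = list(primer)
--     s = sum(primer)
--     while len(key) < length:
--         d = s % base
--         s += d - key[len(key) - n]
--         key.append(d)
--     return key[:length]
-- ===== Notes on version B (the rewrite author's own statement) =====
-- stated objective: alternative
-- what changed: B replaces A's per-digit inner loop that re-sums the last len(primer) digits by an incrementally maintained sliding-window sum (add the new digit, subtract the digit leaving the window), plus a direct zeros result for an empty primer.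
import Mathlib
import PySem

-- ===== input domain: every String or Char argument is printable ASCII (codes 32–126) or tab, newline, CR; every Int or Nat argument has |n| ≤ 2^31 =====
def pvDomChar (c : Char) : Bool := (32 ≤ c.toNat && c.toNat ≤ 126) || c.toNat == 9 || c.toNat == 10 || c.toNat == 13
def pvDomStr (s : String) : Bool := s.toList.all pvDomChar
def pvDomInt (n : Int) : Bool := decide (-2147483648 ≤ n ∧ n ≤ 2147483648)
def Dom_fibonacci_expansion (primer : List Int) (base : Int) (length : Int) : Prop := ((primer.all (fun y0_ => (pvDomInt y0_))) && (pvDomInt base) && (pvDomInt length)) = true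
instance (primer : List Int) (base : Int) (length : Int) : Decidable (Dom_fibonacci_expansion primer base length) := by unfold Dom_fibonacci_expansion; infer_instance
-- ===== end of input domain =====

-- B replaces A's per-digit inner summation pass over the last len(primer) digits by an
-- incrementally maintained sliding-window sum (add the new digit, drop the leaving one).

-- ===== PORT A =====
-- next_digit = 0; for i in range(1, len(primer)+1): if i <= len(key): next_digit = (next_digit + key[-i]) % base
def fibInnerA (primer key : List Int) (base : Int) : Int :=
  (PySem.List.pyRange 1 ((primer.length : Int) + 1) 1).foldl
    (fun acc i => if i ≤ (key.length : Int) then PySem.Int.mod (acc + PySem.List.pyGetD key (-i) 0) base else acc) 0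

-- while len(key) < length: key.append(next_digit); fuel = number of remaining appends
def fibLoopA (primer : List Int) (base length : Int) (key : List Int) : Nat → List Int
  | 0 => key
  | fuel + 1 =>
    if (key.length : Int) < length then
      fibLoopA primer base length (key ++ [fibInnerA primer key base]) fuel
    else key

def fibonacci_expansion (primer : List Int) (base : Int) (length : Int) : List Int :=
  PySem.List.slice (fibLoopA primer base length primer (length - (primer.length : Int)).toNat) none (some length)

-- ===== PORT B =====
-- while len(key) < length: d = s % base; s += d - key[len(key)-n]; key.append(d)
def fibLoopB (base length : Int) (n : Nat) : List Int → Int → Nat → List Int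
  | key, _, 0 => key
  | key, s, fuel + 1 =>
    if (key.length : Int) < length then
      let d := PySem.Int.mod s base
      fibLoopB base length n (key ++ [d]) (s + d - PySem.List.pyGetD key ((key.length : Int) - (n : Int)) 0) fuel
    else key

def fibonacci_expansion_alt (primer : List Int) (base : Int) (length : Int) : List Int :=
  if primer = [] then List.replicate (max length 0).toNat 0
  else
    PySem.List.slice
      (fibLoopB base length primer.length primer primer.sum (length - (primer.length : Int)).toNat)
      none (some length)

-- ===== PRECONDITION & SPEC =====
-- Pre_ excludes exactly the inputs where A raises ZeroDivisionError: base = 0 while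
-- the loop must run (nonempty primer shorter than length); A returns everywhere else.
def Pre_fibonacci_expansion (primer : List Int) (base : Int) (length : Int) : Prop :=
  length ≤ (primer.length : Int) ∨ primer = [] ∨ base ≠ 0
instance (primer : List Int) (base : Int) (length : Int) : Decidable (Pre_fibonacci_expansion primer base length) := by unfold Pre_fibonacci_expansion; infer_instance

def pvWitness_fibonacci_expansion : List Int × Int × Int := ([1, 2, 3], 5, 8)

def Spec_fibonacci_expansion (primer : List Int) (base : Int) (length : Int) (out : List Int) : Prop := out = fibonacci_expansion_alt primer base length
instance (primer : List Int) (base : Int) (length : Int) (out : List Int) : Decidable (Spec_fibonacci_expansion primer base length out) := by unfold Spec_fibonacci_expansion; infer_instance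

-- ===== CLAIM (what is proved, stated in full; the proofs are below) =====
def Claim_equal_fibonacci_expansion : Prop := ∀ (primer : List Int) (base : Int) (length : Int), Dom_fibonacci_expansion primer base length → Pre_fibonacci_expansion primer base length → Spec_fibonacci_expansion primer base length (fibonacci_expansion primer base length)

-- ===== LEMMAS AND PROOFS =====

theorem pv_mod_mod_add (x y b : Int) :
    PySem.Int.mod (PySem.Int.mod x b + y) b = PySem.Int.mod (x + y) b := by
  simp [PySem.Int.mod]

-- A's inner fold computes the window sum mod base.
theorem fibInner_eq_window (key : List Int) (base : Int) :
    ∀ (m : Nat), 1 ≤ m → m ≤ key.length → ∀ acc : Int,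
      (PySem.List.pyRange 1 ((m : Int) + 1) 1).foldl
        (fun acc i => if i ≤ (key.length : Int) then PySem.Int.mod (acc + PySem.List.pyGetD key (-i) 0) base else acc) acc
      = PySem.Int.mod (acc + (key.drop (key.length - m)).sum) base := by
  intro m
  induction m with
  | zero => intro h; omega
  | succ m ih =>
    intro _ hlen acc
    by_cases hm : 1 ≤ m
    · have hsplit : PySem.List.pyRange 1 ((↑(m + 1) : Int) + 1) 1
          = PySem.List.pyRange 1 ((m : Int) + 1) 1 ++ [(m : Int) + 1] := by
        have h := PySem.List.pyRange_one_succ_right (a := 1) (b := (m : Int) + 1) (by omega)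
        push_cast
        push_cast at h
        convert h using 2
      rw [hsplit, List.foldl_append, ih hm (by omega) acc]
      simp only [List.foldl_cons, List.foldl_nil]
      have hguard : (m : Int) + 1 ≤ (key.length : Int) := by exact_mod_cast hlen
      rw [if_pos hguard]
      have hidx : PySem.List.pyGetD key (-((m : Int) + 1)) 0 = key[key.length - (m + 1)]'(by omega) := by
        have := PySem.List.pyGetD_neg_natCast key (m + 1) 0 (by omega) hlen
        push_cast at this
        convert this using 3
      rw [hidx, pv_mod_mod_add]
      have hdrop : key.drop (key.length - (m + 1))
          = key[key.length - (m + 1)]'(by omega) :: key.drop (key.length - m) := by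
        rw [List.drop_eq_getElem_cons (by omega)]
        have e : key.length - (m + 1) + 1 = key.length - m := by omega
        rw [e]
      rw [hdrop]
      simp only [List.sum_cons]
      ring_nf
    · have hm0 : m = 0 := by omega
      subst hm0
      have h1 : PySem.List.pyRange 1 ((↑(1 : Nat) : Int) + 1) 1 = [1] := by
        have := PySem.List.pyRange_one_singleton (a := 1)
        norm_num at this ⊢
        exact this
      rw [h1]
      simp only [List.foldl_cons, List.foldl_nil]
      have hguard : (1 : Int) ≤ (key.length : Int) := by exact_mod_cast hlen
      rw [if_pos hguard]
      have hidx : PySem.List.pyGetD key (-1) 0 = key[key.length - 1]'(by omega) := by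
        have := PySem.List.pyGetD_neg_natCast key 1 0 (by omega) hlen
        push_cast at this
        convert this using 3
      rw [hidx]
      have hdrop : key.drop (key.length - 1) = [key[key.length - 1]'(by omega)] := by
        have h := List.drop_eq_getElem_cons (l := key) (i := key.length - 1) (by omega)
        rw [h]
        have h2 : key.length - 1 + 1 = key.length := by omega
        rw [h2, List.drop_length]
      rw [hdrop]
      simp

-- The two loops agree whenever the window sum invariant holds (nonempty primer).
theorem loop_eq (primer : List Int) (hne : primer ≠ []) (base length : Int) :
    ∀ (fuel : Nat) (key : List Int), primer.length ≤ key.length →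
      fibLoopA primer base length key fuel
        = fibLoopB base length primer.length key ((key.drop (key.length - primer.length)).sum) fuel := by
  intro fuel
  induction fuel with
  | zero => intro key _; rfl
  | succ fuel ih =>
    intro key hlen
    rw [fibLoopA, fibLoopB]
    by_cases hc : (key.length : Int) < length
    · rw [if_pos hc, if_pos hc]
      have hn1 : 1 ≤ primer.length := by
        cases primer with
        | nil => exact absurd rfl hne
        | cons a l => simp
      have hinner : fibInnerA primer key base
          = PySem.Int.mod ((key.drop (key.length - primer.length)).sum) base := by
        have := fibInner_eq_window key base primer.length hn1 hlen 0
        unfold fibInnerA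
        rw [this]
        norm_num
      rw [hinner]
      set d := PySem.Int.mod ((key.drop (key.length - primer.length)).sum) base with hd
      have hidx : PySem.List.pyGetD key ((key.length : Int) - (primer.length : Int)) 0
          = key[key.length - primer.length]'(by omega) := by
        have := PySem.List.pyGetD_eq_getElem (xs := key) (i := (key.length : Int) - (primer.length : Int)) (d := 0)
          (by omega) (by omega)
        rw [this]
        congr 1
        omega
      have hsum : ((key ++ [d]).drop ((key ++ [d]).length - primer.length)).sum
          = (key.drop (key.length - primer.length)).sum + d
            - PySem.List.pyGetD key ((key.length : Int) - (primer.length : Int)) 0 := by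
        rw [hidx]
        have hlen' : (key ++ [d]).length = key.length + 1 := by simp
        have hdrop2 := List.drop_append_of_le_length (l₁ := key) (l₂ := [d])
          (i := key.length + 1 - primer.length) (by omega)
        have hdrop1 : key.drop (key.length - primer.length)
            = key[key.length - primer.length]'(by omega) :: key.drop (key.length + 1 - primer.length) := by
          rw [List.drop_eq_getElem_cons (by omega)]
          have e : key.length - primer.length + 1 = key.length + 1 - primer.length := by omega
          rw [e]
        rw [hlen', hdrop2, hdrop1]
        simp only [List.sum_append, List.sum_cons, List.sum_nil]
        ring
      show fibLoopA primer base length (key ++ [d]) fuel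
          = fibLoopB base length primer.length (key ++ [d])
              ((key.drop (key.length - primer.length)).sum + d
                - PySem.List.pyGetD key ((key.length : Int) - (primer.length : Int)) 0) fuel
      rw [← hsum]
      exact ih (key ++ [d]) (by simp; omega)
    · rw [if_neg hc, if_neg hc]

-- A's loop on an empty primer appends zeros.
theorem loopA_nil (base length : Int) :
    ∀ (fuel : Nat) (key : List Int), (key.length : Int) + (fuel : Int) = length →
      fibLoopA [] base length key fuel = key ++ List.replicate fuel 0 := by
  intro fuel
  induction fuel with
  | zero => intro key _; simp [fibLoopA]
  | succ fuel ih =>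
    intro key hkey
    rw [fibLoopA]
    have hc : (key.length : Int) < length := by push_cast at hkey; omega
    rw [if_pos hc]
    have hinner : fibInnerA [] key base = 0 := by
      unfold fibInnerA
      rw [PySem.List.pyRange_one_eq_nil (by norm_num)]
      rfl
    rw [hinner, ih (key ++ [0]) (by simp only [List.length_append, List.length_cons, List.length_nil]; push_cast at hkey ⊢; omega)]
    simp [List.replicate_succ]

theorem slice_full (xs : List Int) (length : Int) (h : (xs.length : Int) ≤ length) :
    PySem.List.slice xs none (some length) = xs := by
  rw [PySem.List.slice_to xs (by omega)]
  exact List.take_of_length_le (by omega)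

-- ===== VERDICT (by name: the statement is the Claim_ definition above) =====
theorem fibonacci_expansion_spec : Claim_equal_fibonacci_expansion := by
  intro primer base length _ hpre
  unfold Spec_fibonacci_expansion fibonacci_expansion fibonacci_expansion_alt
  by_cases hne : primer = []
  · subst hne
    rw [if_pos rfl]
    simp only [List.length_nil, Nat.cast_zero, sub_zero]
    by_cases hl : 0 < length
    · rw [loopA_nil base length length.toNat [] (by simp; omega)]
      simp only [List.nil_append]
      rw [slice_full _ _ (by simp; omega)]
      congr 1
      omega
    · have h0 : length.toNat = 0 := by omega
      rw [h0]
      have hmax : (max length 0).toNat = 0 := by omega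
      rw [hmax]
      simp only [fibLoopA, List.replicate_zero]
      rw [PySem.List.slice]
      simp
  · rw [if_neg hne]
    by_cases hb : base ≠ 0
    · have := loop_eq primer hne base length (length - (primer.length : Int)).toNat primer le_rfl
      rw [this]
      simp
    · -- base = 0: Pre_ forces length ≤ primer.length, so fuel = 0 and both loops are no-ops
      have hfuel : (length - (primer.length : Int)).toNat = 0 := by
        rcases hpre with h | h | h
        · omega
        · exact absurd h hne
        · exact absurd h hb
      rw [hfuel]
      rfl
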